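-- pv_equiv track=rewrite | github.com/thatAverageGuy/code_an | backend/utils/helpers.py | find_common_imports
-- ===== SOURCE A (Python) =====
-- from typing import Dict, List, Any, Optional, Set, Tuple
--
-- def find_common_imports(analysis_results: Dict[str, Dict]) -> Set[str]:
--     """
--     Find common imports across multiple files
--
--     Args:
--         analysis_results: Dictionary of file analysis results
--
--     Returns:
--         Set of common import names
--     """
--     if not analysis_results:
--         return set()
--
--     # Get all imports for each file
--     file_imports = []
--     for file_path, analysis in analysis_results.items():
--         if 'imports' in analysis:
--             file_imports.append(set(analysis['imports'].keys()))
--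
--     if not file_imports:
--         return set()
--
--     # Find intersection of all import sets
--     common_imports = set.intersection(*file_imports)
--     return common_imports
-- ===== SOURCE B (Python) =====
-- from typing import Dict, Set
--
-- def find_common_imports(analysis_results: Dict[str, Dict]) -> Set[str]:
--     """Count, for each import name, how many analyzed files (with an
--     'imports' key) import it; the common imports are those whose count
--     equals the number of such files."""
--     counts = {}
--     n = 0
--     for analysis in analysis_results.values():
--         if 'imports' in analysis:
--             n += 1
--             for name in analysis['imports'].keys():
--                 counts[name] = counts.get(name, 0) + 1
--     if n == 0:
--         return set()
--     return {name for name, c in counts.items() if c == n}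
-- ===== Notes on version B (the rewrite author's own statement) =====
-- stated objective: alternative
-- what changed: Replaces building a list of per-file key sets and intersecting them with a single sweep that maintains a frequency table over import names plus a counted-file counter, then filters names whose count equals the file count.
import Mathlib
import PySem

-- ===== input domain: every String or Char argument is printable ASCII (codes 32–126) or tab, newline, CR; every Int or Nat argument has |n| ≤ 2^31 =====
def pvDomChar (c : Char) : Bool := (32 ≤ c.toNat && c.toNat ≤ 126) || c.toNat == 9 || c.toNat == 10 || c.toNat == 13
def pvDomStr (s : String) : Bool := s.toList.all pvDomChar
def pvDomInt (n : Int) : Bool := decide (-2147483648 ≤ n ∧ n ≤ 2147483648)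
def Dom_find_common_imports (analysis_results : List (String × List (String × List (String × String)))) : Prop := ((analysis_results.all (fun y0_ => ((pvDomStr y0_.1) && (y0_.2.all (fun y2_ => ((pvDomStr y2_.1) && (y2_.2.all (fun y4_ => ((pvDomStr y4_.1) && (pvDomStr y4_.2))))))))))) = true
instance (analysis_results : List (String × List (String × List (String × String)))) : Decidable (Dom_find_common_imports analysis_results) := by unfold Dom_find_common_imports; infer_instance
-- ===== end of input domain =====

-- B replaces the intersection of per-file import-key sets by a one-sweep frequency
-- table over import names filtered by the number of counted files (alternative
-- decomposition, same cost).

-- ===== PORT A =====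
-- A: collect set(analysis['imports'].keys()) per file that has 'imports', then
-- intersect all those sets (empty dict / no such file → empty set).
def find_common_imports (analysis_results : List (String × List (String × List (String × String)))) : List String :=
  if analysis_results = [] then []
  else
    let file_imports :=
      (PySem.Dict.ofList analysis_results).items.foldl
        (fun acc p =>
          if (PySem.Dict.ofList p.2).contains "imports" = true then
            acc ++ [PySem.Set.ofList
              (PySem.Dict.ofList ((PySem.Dict.ofList p.2).getD "imports" [])).keys]
          else acc) []
    match file_imports with
    | [] => []
    | h :: t => t.foldl PySem.Set.inter h

-- ===== PORT B =====
-- B: one sweep: count files that have 'imports' (n) and, in a dict, how many of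
-- them mention each import name; result = names whose count equals n.
def find_common_imports_alt (analysis_results : List (String × List (String × List (String × String)))) : List String :=
  let st :=
    (PySem.Dict.ofList analysis_results).values.foldl
      (fun acc analysis =>
        if (PySem.Dict.ofList analysis).contains "imports" = true then
          ((PySem.Dict.ofList ((PySem.Dict.ofList analysis).getD "imports" [])).keys.foldl
             (fun d name => d.modify name 0 (· + 1)) acc.1,
           acc.2 + 1)
        else acc)
      ((PySem.Dict.empty : PySem.Dict String Int), (0 : Int))
  if st.2 = 0 then []
  else (st.1.items.filter (fun p => p.2 == st.2)).map (fun p => p.1)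

-- ===== PRECONDITION & SPEC =====
def Spec_find_common_imports (analysis_results : List (String × List (String × List (String × String)))) (out : List String) : Prop := out = find_common_imports_alt analysis_results
instance (analysis_results : List (String × List (String × List (String × String)))) (out : List String) : Decidable (Spec_find_common_imports analysis_results out) := by unfold Spec_find_common_imports; infer_instance

-- ===== CLAIM (what is proved, stated in full; the proofs are below) =====
def Claim_equal_find_common_imports : Prop := ∀ (analysis_results : List (String × List (String × List (String × String)))), Dom_find_common_imports analysis_results → Spec_find_common_imports analysis_results (find_common_imports analysis_results)

-- ===== LEMMAS AND PROOFS =====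

-- Shared abstraction: the list of per-file import-key lists (files with 'imports').
def pvHasImp (p : String × List (String × List (String × String))) : Bool :=
  (PySem.Dict.ofList p.2).contains "imports"

def pvKeys (p : String × List (String × List (String × String))) : List String :=
  (PySem.Dict.ofList ((PySem.Dict.ofList p.2).getD "imports" ([] : List (String × String)))).keys

def pvL (ar : List (String × List (String × List (String × String)))) : List (List String) :=
  ((PySem.Dict.ofList ar).items.filter pvHasImp).map pvKeys

lemma pvL_nodup (ar : List (String × List (String × List (String × String)))) :
    ∀ l ∈ pvL ar, l.Nodup := by
  intro l hl
  simp only [pvL, List.mem_map] at hl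
  obtain ⟨p, -, rfl⟩ := hl
  exact PySem.Dict.nodup_keys_ofList _

-- A computed on the abstraction.
lemma pvA_eq (ar : List (String × List (String × List (String × String)))) :
    find_common_imports ar =
      (match pvL ar with
       | [] => []
       | h :: t => t.foldl PySem.Set.inter h) := by
  unfold find_common_imports
  by_cases har : ar = []
  · subst har; rfl
  · rw [if_neg har]
    have hfold := PySem.List.foldl_append_if
      (fun p : String × List (String × List (String × String)) =>
        (PySem.Dict.ofList p.2).contains "imports")
      (fun p => PySem.Set.ofList
        (PySem.Dict.ofList ((PySem.Dict.ofList p.2).getD "imports" ([] : List (String × String)))).keys)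
      (PySem.Dict.ofList ar).items []
    simp only [List.nil_append] at hfold
    rw [hfold]
    have h2 : ∀ ps : List (String × List (String × List (String × String))),
        ps.map (fun p => PySem.Set.ofList
          (PySem.Dict.ofList ((PySem.Dict.ofList p.2).getD "imports" ([] : List (String × String)))).keys)
          = ps.map pvKeys := by
      intro ps
      apply List.map_congr_left
      intro p _
      exact PySem.Set.ofList_eq_self_of_nodup _ (PySem.Dict.nodup_keys_ofList _)
    rw [h2]
    rfl

-- B's loop body, on pairs.
def pvStep (acc : PySem.Dict String Int × Int) (p : String × List (String × List (String × String))) :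
    PySem.Dict String Int × Int :=
  if pvHasImp p then
    ((pvKeys p).foldl (fun d name => d.modify name 0 (· + 1)) acc.1, acc.2 + 1)
  else acc

lemma pvB_fold (qs : List (String × List (String × List (String × String))))
    (d : PySem.Dict String Int) (n : Int) :
    qs.foldl pvStep (d, n) =
      (((qs.filter pvHasImp).map pvKeys).flatten.foldl
          (fun d x => d.modify x 0 (· + 1)) d,
        n + ((qs.filter pvHasImp).length : Int)) := by
  induction qs generalizing d n with
  | nil => simp
  | cons q qs ih =>
      by_cases hq : pvHasImp q
      · simp only [List.foldl_cons, pvStep, if_pos hq, List.filter_cons_of_pos hq,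
          List.map_cons, List.flatten_cons, List.foldl_append, List.length_cons, ih]
        simp only [Prod.mk.injEq, true_and]
        push_cast; ring
      · simp only [List.foldl_cons, pvStep, if_neg hq, List.filter_cons_of_neg hq, ih]

-- B computed on the abstraction.
lemma pvB_eq (ar : List (String × List (String × List (String × String)))) :
    find_common_imports_alt ar =
      (if pvL ar = [] then []
       else ((PySem.Dict.counter (pvL ar).flatten).items.filter
               (fun p => p.2 == ((pvL ar).length : Int))).map (fun p => p.1)) := by
  unfold find_common_imports_alt
  rw [show (PySem.Dict.ofList ar).values = (PySem.Dict.ofList ar).items.map (fun p => p.2) from rfl,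
     List.foldl_map]
  rw [show (List.foldl (fun acc p => if (PySem.Dict.ofList (p.2 : List (String × List (String × String)))).contains "imports" = true then
          ((PySem.Dict.ofList ((PySem.Dict.ofList p.2).getD "imports" [])).keys.foldl
             (fun d name => d.modify name 0 (· + 1)) acc.1, acc.2 + 1) else acc)
      ((PySem.Dict.empty : PySem.Dict String Int), (0 : Int)) (PySem.Dict.ofList ar).items)
      = List.foldl pvStep ((PySem.Dict.empty : PySem.Dict String Int), (0 : Int)) (PySem.Dict.ofList ar).items from rfl]
  rw [pvB_fold]
  simp only [PySem.Dict.counter_eq_foldl, pvL, zero_add, List.length_map]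
  by_cases h : ((PySem.Dict.ofList ar).items.filter pvHasImp) = []
  · simp [h]
  · rw [if_neg (by simpa using h), if_neg (by simpa using h)]

-- foldl of set intersection is a filter by membership in every remaining set.
lemma pvInter_fold (t : List (List String)) (h : List String) :
    t.foldl PySem.Set.inter h = h.filter (fun x => t.all (fun l => l.contains x)) := by
  induction t generalizing h with
  | nil => simp
  | cons l t ih =>
      rw [List.foldl_cons, ih]
      rw [show PySem.Set.inter h l = h.filter (fun x => l.contains x) from rfl]
      rw [List.filter_filter]
      apply List.filter_congr
      intro x _
      simp [Bool.and_comm]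

-- Set.update appends only fresh elements.
lemma pvUpdate_split (r : List String) (s : PySem.Set String) :
    ∃ e, s.update r = s ++ e ∧ ∀ y ∈ e, y ∉ s := by
  induction r generalizing s with
  | nil => exact ⟨[], by simp [PySem.Set.update]⟩
  | cons x r ih =>
      rw [show PySem.Set.update s (x :: r) = PySem.Set.update (PySem.Set.add s x) r from rfl]
      obtain ⟨e, he, hd⟩ := ih (PySem.Set.add s x)
      by_cases hx : x ∈ s
      · have ha : PySem.Set.add s x = s := by
          simp [PySem.Set.add, PySem.Set.contains, List.contains_eq_mem, hx]
        rw [ha] at he hd ⊢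
        exact ⟨e, he, hd⟩
      · have ha : PySem.Set.add s x = s ++ [x] := by
          simp [PySem.Set.add, PySem.Set.contains, List.contains_eq_mem, hx]
        rw [ha] at he hd ⊢
        refine ⟨x :: e, by simpa using he, ?_⟩
        intro y hy
        rcases List.mem_cons.mp hy with rfl | hy'
        · exact hx
        · exact fun hmem => hd y hy' (by simp [hmem])

-- counting: sum of per-list counts equals the length iff the element is everywhere.
lemma pvSum_le (k : String) (L : List (List String)) (hnd : ∀ l ∈ L, l.Nodup) :
    (L.map (List.count k)).sum ≤ L.length := by
  induction L with
  | nil => simp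
  | cons l L ih =>
      have h1 : List.count k l ≤ 1 := List.nodup_iff_count_le_one.mp (hnd l (by simp)) k
      have h2 := ih (fun l' hl' => hnd l' (by simp [hl']))
      simp only [List.map_cons, List.sum_cons, List.length_cons]
      omega

lemma pvCount_eq_iff (k : String) (L : List (List String)) (hnd : ∀ l ∈ L, l.Nodup) :
    ((L.map (List.count k)).sum = L.length) ↔ ∀ l ∈ L, k ∈ l := by
  induction L with
  | nil => simp
  | cons l L ih =>
      have h1 : List.count k l ≤ 1 := List.nodup_iff_count_le_one.mp (hnd l (by simp)) k
      have h2 := pvSum_le k L (fun l' hl' => hnd l' (by simp [hl']))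
      have h3 := ih (fun l' hl' => hnd l' (by simp [hl']))
      simp only [List.map_cons, List.sum_cons, List.length_cons, List.mem_cons]
      constructor
      · intro he
        have hc : List.count k l = 1 := by omega
        have hs : (L.map (List.count k)).sum = L.length := by omega
        refine fun l' hl' => ?_
        rcases hl' with rfl | hl'
        · exact List.count_pos_iff.mp (by omega)
        · exact (h3.mp hs) l' hl'
      · intro hall
        have hc : 0 < List.count k l := List.count_pos_iff.mpr (hall l (Or.inl rfl))
        have hs : (L.map (List.count k)).sum = L.length := h3.mpr (fun l' hl' => hall l' (Or.inr hl'))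
        omega

-- the core equality on the abstraction.
lemma pvCore (h : List String) (t : List (List String)) (hnd : ∀ l ∈ (h :: t), l.Nodup) :
    t.foldl PySem.Set.inter h =
      ((PySem.Dict.counter (h :: t).flatten).items.filter
          (fun p => p.2 == ((h :: t).length : Int))).map (fun p => p.1) := by
  have hh : h.Nodup := hnd h (by simp)
  rw [pvInter_fold, PySem.Dict.items_counter, List.filter_map, List.map_map]
  have hmap : ((fun p : String × Int => p.1) ∘ (fun k => (k, (List.count k (h :: t).flatten : Int)))) = id := rfl
  rw [hmap, List.map_id]
  have hP : ∀ k, ((fun p : String × Int => p.2 == ((h :: t).length : Int)) ∘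
        (fun k => (k, (List.count k (h :: t).flatten : Int)))) k = true ↔ ∀ l ∈ (h :: t), k ∈ l := by
    intro k
    simp only [Function.comp_apply, beq_iff_eq, Nat.cast_inj, List.count_flatten]
    exact pvCount_eq_iff k (h :: t) hnd
  have hfl : PySem.Set.ofList (h :: t).flatten = (PySem.Set.ofList h).update t.flatten := by
    rw [show (h :: t).flatten = h ++ t.flatten from rfl, PySem.Set.ofList_append]
  rw [hfl, PySem.Set.ofList_eq_self_of_nodup h hh]
  obtain ⟨e, he, hd⟩ := pvUpdate_split t.flatten h
  rw [he, List.filter_append]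
  have he0 : e.filter ((fun p : String × Int => p.2 == ((h :: t).length : Int)) ∘
        (fun k => (k, (List.count k (h :: t).flatten : Int)))) = [] := by
    rw [List.filter_eq_nil_iff]
    intro y hy hPy
    exact hd y hy (((hP y).mp hPy) h (by simp))
  rw [he0, List.append_nil]
  apply List.filter_congr
  intro x hx
  rw [Bool.eq_iff_iff, hP x]
  simp only [List.all_eq_true, List.mem_cons, List.contains_eq_mem, decide_eq_true_eq]
  constructor
  · intro hall l hl
    rcases hl with rfl | hl
    · exact hx
    · exact hall l hl
  · intro hall l hl
    exact hall l (Or.inr hl)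

-- ===== VERDICT (by name: the statement is the Claim_ definition above) =====
theorem find_common_imports_spec : Claim_equal_find_common_imports := by
  intro ar _
  unfold Spec_find_common_imports
  rw [pvA_eq, pvB_eq]
  cases hp : pvL ar with
  | nil => simp
  | cons h t =>
      rw [if_neg (by simp)]
      exact pvCore h t (hp ▸ pvL_nodup ar)
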